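-- pv_equiv track=rewrite | github.com/aniketk33/LeetcodeSolutions | arrays/x-of-a-kind.py | has_group_size_x
-- ===== SOURCE A (Python) =====
-- def has_group_size_x(deck):
--     if len(deck) == 1:
--         return False
--     counter = {}
--     for num in deck:
--         if num in counter:
--             counter[num] += 1
--             continue
--         counter[num] = 1
--
--     result = set(counter.values())
--
--     return len(result) == 1
-- ===== SOURCE B (Python) =====
-- def has_group_size_x(deck):
--     if len(deck) == 1:
--         return False
--     runs = []
--     run = 0
--     prev = None
--     for y in sorted(deck):
--         if run and y == prev:
--             run += 1
--         else:
--             if run: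
--                 runs.append(run)
--             run = 1
--             prev = y
--     if run:
--         runs.append(run)
--     return len(set(runs)) == 1
-- ===== Notes on version B (the rewrite author's own statement) =====
-- stated objective: alternative
-- what changed: B replaces A's counting dictionary and set of counts by sorting the deck and scanning it once, collecting the lengths of maximal runs of equal values and testing whether all run lengths are equal.
import Mathlib
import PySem

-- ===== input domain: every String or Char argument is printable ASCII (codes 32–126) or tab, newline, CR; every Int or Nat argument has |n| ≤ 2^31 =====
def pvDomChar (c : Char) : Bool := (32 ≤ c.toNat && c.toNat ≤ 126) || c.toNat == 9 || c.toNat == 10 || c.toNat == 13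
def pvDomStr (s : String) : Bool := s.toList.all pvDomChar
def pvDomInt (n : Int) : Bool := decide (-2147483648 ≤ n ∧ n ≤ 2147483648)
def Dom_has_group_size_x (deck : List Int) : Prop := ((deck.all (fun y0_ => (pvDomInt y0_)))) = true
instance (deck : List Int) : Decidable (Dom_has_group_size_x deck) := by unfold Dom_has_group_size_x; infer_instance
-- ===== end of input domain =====

-- B replaces A's counting-dict + set-of-values by sort-then-one-scan over runs of
-- equal values (alternative decomposition of the same check).

-- ===== PORT A =====
def has_group_size_x (deck : List Int) : Bool :=
  if deck.length == 1 then false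
  else
    -- for num in deck: if num in counter: counter[num] += 1 else counter[num] = 1
    let counter : PySem.Dict Int Int :=
      deck.foldl (fun c num =>
        if c.contains num then c.insert num (c.getD num 0 + 1) else c.insert num 1)
        PySem.Dict.empty
    let result : PySem.Set Int := PySem.Set.ofList counter.values
    PySem.Set.len result == 1

-- ===== PORT B =====
-- loop body: state = (runs, run, prev); Python's initial 'prev = None' is never
-- compared while run == 0, so it is modelled by the unused placeholder 0.
def stepB (st : List Int × Int × Int) (y : Int) : List Int × Int × Int :=
  if st.2.1 ≠ 0 ∧ y = st.2.2 then (st.1, st.2.1 + 1, st.2.2)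
  else ((if st.2.1 ≠ 0 then st.1 ++ [st.2.1] else st.1), 1, y)

def has_group_size_x_alt (deck : List Int) : Bool :=
  if deck.length == 1 then false
  else
    let st := (PySem.List.sorted deck (fun x => x) false).foldl stepB (([] : List Int), 0, 0)
    let runs := if st.2.1 ≠ 0 then st.1 ++ [st.2.1] else st.1
    PySem.Set.len (PySem.Set.ofList runs) == 1

-- ===== PRECONDITION & SPEC =====
def Spec_has_group_size_x (deck : List Int) (out : Bool) : Prop := out = has_group_size_x_alt deck
instance (deck : List Int) (out : Bool) : Decidable (Spec_has_group_size_x deck out) := by unfold Spec_has_group_size_x; infer_instance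

-- ===== CLAIM (what is proved, stated in full; the proofs are below) =====
def Claim_equal_has_group_size_x : Prop := ∀ (deck : List Int), Dom_has_group_size_x deck → Spec_has_group_size_x deck (has_group_size_x deck)

-- ===== LEMMAS AND PROOFS =====

-- A's counting loop is exactly the Counter fold.
theorem counterFold_eq (deck : List Int) :
    deck.foldl (fun (c : PySem.Dict Int Int) num =>
        if c.contains num then c.insert num (c.getD num 0 + 1) else c.insert num 1)
      PySem.Dict.empty = PySem.Dict.counter deck := by
  rw [← PySem.Dict.foldl_insert_getD_add_one_eq_counter]
  apply PySem.List.foldl_congr_mem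
  intro c num _
  by_cases h : c.contains num = true
  · simp [h]
  · simp only [Bool.not_eq_true] at h
    simp [h, PySem.Dict.getD_of_not_contains c 0 h]

-- clean recursion computing the run lengths of cur (seen n times) followed by t
def runAux (cur n : Int) : List Int → List Int
  | [] => [n]
  | y :: t => if y = cur then runAux cur (n + 1) t else n :: runAux y 1 t

def runList : List Int → List Int
  | [] => []
  | x :: t => runAux x 1 t

-- the B-side accumulator fold computes runAux
theorem stepB_run (runs : List Int) (n prev y : Int) (hn : n ≠ 0) (hy : y = prev) :
    stepB (runs, n, prev) y = (runs, n + 1, prev) := by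
  simp [stepB, hn, hy]

theorem stepB_new (runs : List Int) (n prev y : Int) (hn : n ≠ 0) (hy : y ≠ prev) :
    stepB (runs, n, prev) y = (runs ++ [n], 1, y) := by
  simp [stepB, hn, hy]

theorem foldB_eq (t : List Int) : ∀ (runs : List Int) (n prev : Int), 0 < n →
    (let st := t.foldl stepB (runs, n, prev)
      if st.2.1 ≠ 0 then st.1 ++ [st.2.1] else st.1) = runs ++ runAux prev n t := by
  induction t with
  | nil =>
    intro runs n prev hn
    show (if n ≠ 0 then runs ++ [n] else runs) = runs ++ runAux prev n []
    rw [if_pos (by omega : n ≠ 0)]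
    rfl
  | cons y t ih =>
    intro runs n prev hn
    by_cases hy : y = prev
    · show (let st := t.foldl stepB (stepB (runs, n, prev) y)
          if st.2.1 ≠ 0 then st.1 ++ [st.2.1] else st.1) = runs ++ runAux prev n (y :: t)
      rw [stepB_run runs n prev y (by omega) hy, ih runs (n + 1) prev (by omega)]
      simp [runAux, hy]
    · show (let st := t.foldl stepB (stepB (runs, n, prev) y)
          if st.2.1 ≠ 0 then st.1 ++ [st.2.1] else st.1) = runs ++ runAux prev n (y :: t)
      rw [stepB_new runs n prev y (by omega) hy, ih (runs ++ [n]) 1 y (by omega)]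
      simp [runAux, hy]

theorem foldB_runList (s : List Int) :
    (let st := s.foldl stepB (([] : List Int), 0, 0)
      if st.2.1 ≠ 0 then st.1 ++ [st.2.1] else st.1) = runList s := by
  cases s with
  | nil => simp [runList]
  | cons x t =>
    have h0 : stepB (([] : List Int), 0, 0) x = ([], 1, x) := by simp [stepB]
    show (let st := t.foldl stepB (stepB (([] : List Int), 0, 0) x)
        if st.2.1 ≠ 0 then st.1 ++ [st.2.1] else st.1) = runList (x :: t)
    rw [h0, foldB_eq t [] 1 x (by omega)]
    rfl

theorem runAux_replicate (m : Nat) (cur n : Int) (t : List Int) :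
    runAux cur n (List.replicate m cur ++ t) = runAux cur (n + m) t := by
  induction m generalizing n with
  | zero => simp
  | succ m ih =>
    rw [List.replicate_succ, List.cons_append]
    show (if cur = cur then runAux cur (n + 1) (List.replicate m cur ++ t)
        else n :: runAux cur 1 (List.replicate m cur ++ t)) = _
    rw [if_pos rfl, ih]
    congr 1
    push_cast
    ring

theorem runAux_of_not_mem (cur n : Int) (t : List Int) (h : cur ∉ t) :
    runAux cur n t = n :: runList t := by
  cases t with
  | nil => simp [runAux, runList]
  | cons y t' =>
    have : y ≠ cur := fun hy => h (hy ▸ List.mem_cons_self)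
    simp [runAux, this, runList]

-- a sorted list splits as head-run ++ rest without the head
theorem sorted_head_split (x : Int) : ∀ (rest : List Int),
    (x :: rest).Pairwise (· ≤ ·) →
    ∃ rest', rest = List.replicate (rest.count x) x ++ rest' ∧ x ∉ rest' ∧
      rest'.Pairwise (· ≤ ·) := by
  intro rest
  induction rest with
  | nil => intro _; exact ⟨[], by simp⟩
  | cons y r ih =>
    intro hp
    have hxy : x ≤ y := (List.pairwise_cons.1 hp).1 y List.mem_cons_self
    have hyr : (y :: r).Pairwise (· ≤ ·) := (List.pairwise_cons.1 hp).2
    by_cases hyx : y = x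
    · subst hyx
      obtain ⟨rest', hr, hnm, hpr⟩ := ih hyr
      refine ⟨rest', ?_, hnm, hpr⟩
      rw [List.count_cons_self, List.replicate_succ, List.cons_append, ← hr]
    · have hnm : x ∉ y :: r := by
        intro hx
        rcases List.mem_cons.1 hx with h1 | h2
        · exact hyx h1.symm
        · exact hyx (le_antisymm ((List.pairwise_cons.1 hyr).1 x h2) hxy)
      have : (y :: r).count x = 0 := List.count_eq_zero.2 hnm
      exact ⟨y :: r, by simp [this], hnm, hyr⟩

-- membership characterisation of the run lengths of a sorted list
theorem mem_runList_sorted : ∀ (N : Nat) (s : List Int), s.length ≤ N →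
    s.Pairwise (· ≤ ·) → ∀ (v : Int), v ∈ runList s ↔ ∃ k ∈ s, (s.count k : Int) = v := by
  intro N
  induction N with
  | zero =>
    intro s hl _ v
    have : s = [] := List.eq_nil_of_length_eq_zero (Nat.le_zero.1 hl)
    subst this; simp [runList]
  | succ N ih =>
    intro s hl hp v
    cases s with
    | nil => simp [runList]
    | cons x rest =>
      obtain ⟨rest', hr, hnm, hpr⟩ := sorted_head_split x rest hp
      have hlen : rest'.length ≤ N := by
        have := congrArg List.length hr
        simp at this hl
        omega
      have hrun : runList (x :: rest) = ((1 : Int) + rest.count x) :: runList rest' := by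
        show runAux x 1 rest = _
        conv_lhs => rw [hr]
        rw [runAux_replicate, runAux_of_not_mem _ _ _ hnm]
      have hcx : ((x :: rest).count x : Int) = 1 + rest.count x := by
        simp [List.count_cons_self]; ring
      have hck : ∀ k, k ≠ x → (x :: rest).count k = rest'.count k := by
        intro k hk
        rw [hr]
        simp [List.count_replicate, Ne.symm hk]
      constructor
      · intro hv
        rw [hrun] at hv
        rcases List.mem_cons.1 hv with h1 | h2
        · exact ⟨x, List.mem_cons_self, by rw [hcx, h1]⟩
        · obtain ⟨k, hk, hkv⟩ := ((ih rest' hlen hpr v).1 h2)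
          have hkx : k ≠ x := fun h => hnm (h ▸ hk)
          refine ⟨k, ?_, by rw [hck k hkx]; exact hkv⟩
          exact List.mem_cons.2 (Or.inr (by rw [hr]; exact List.mem_append_right _ hk))
      · rintro ⟨k, hk, hkv⟩
        rw [hrun]
        by_cases hkx : k = x
        · subst hkx
          exact List.mem_cons.2 (Or.inl (by rw [← hkv, hcx]))
        · have hk' : k ∈ rest' := by
            rcases List.mem_cons.1 hk with h1 | h2
            · exact absurd h1 hkx
            · rw [hr] at h2
              rcases List.mem_append.1 h2 with h3 | h4
              · exact absurd (List.eq_of_mem_replicate h3) hkx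
              · exact h4
          refine List.mem_cons.2 (Or.inr ((ih rest' hlen hpr v).2 ⟨k, hk', ?_⟩))
          rw [← hck k hkx]; exact hkv

-- ===== VERDICT (by name: the statement is the Claim_ definition above) =====
theorem has_group_size_x_spec : Claim_equal_has_group_size_x := by
  intro deck _
  unfold Spec_has_group_size_x has_group_size_x has_group_size_x_alt
  by_cases h1 : deck.length == 1
  · simp [h1]
  · simp only [h1]
    rw [counterFold_eq, foldB_runList]
    set s := PySem.List.sorted deck (fun x => x) false with hs
    have hperm : s.Perm deck := PySem.List.sorted_perm deck (fun x => x) false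
    have hpair : s.Pairwise (· ≤ ·) := PySem.List.sorted_pairwise deck (fun x => x)
    -- A's distinct counter values and B's distinct run lengths are the same finite set
    have hvals : (PySem.Dict.counter deck).values
        = List.map (fun k => ((deck.count k : Nat) : Int)) (PySem.Set.ofList deck) := by
      show ((PySem.Dict.counter deck).items).map Prod.snd = _
      rw [PySem.Dict.items_counter]
      simp [List.map_map, Function.comp]
    have hmem : ∀ v : Int, v ∈ (PySem.Dict.counter deck).values ↔ v ∈ runList s := by
      intro v
      rw [hvals, mem_runList_sorted s.length s le_rfl hpair v]
      constructor
      · rintro hv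
        obtain ⟨k, hk, hkv⟩ := List.mem_map.1 hv
        exact ⟨k, hperm.mem_iff.2 ((PySem.Set.mem_ofList deck k).1 hk),
          by rw [hperm.count_eq]; exact hkv⟩
      · rintro ⟨k, hk, hkv⟩
        exact List.mem_map.2 ⟨k, (PySem.Set.mem_ofList deck k).2 (hperm.mem_iff.1 hk),
          by rw [← hperm.count_eq]; exact hkv⟩
    have hsetperm : (PySem.Set.ofList (PySem.Dict.counter deck).values).Perm
        (PySem.Set.ofList (runList s)) := by
      rw [List.perm_ext_iff_of_nodup (PySem.Set.nodup_ofList _) (PySem.Set.nodup_ofList _)]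
      intro a
      rw [PySem.Set.mem_ofList, PySem.Set.mem_ofList]
      exact hmem a
    simp only [PySem.Set.len, hsetperm.length_eq]
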